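-- pv_equiv track=rewrite | github.com/sukyoung11/Problems_algo | swea/0210/1945_간단한소인수분해/장한나.py | prime_power
-- ===== SOURCE A (Python) =====
-- def prime_power(n):
--     primes = [2, 3, 5, 7, 11]
--     power = []  # 답
--     for prime in primes:
--         # 지수의 갯수 구할 p
--         p = 0
--         while n % prime == 0:  # 나뉘면 (1이 되면 자동적으로 넘어가서 return으로 바로)
--             # 소수의 갯수 세고
--             p += 1
--             # 나뉜 걸로 n을 다시 넣기
--             n = n // prime
--         # 끝나면 p를 답 list에 넣는다
--         power.append(p)
--     return power
-- ===== SOURCE B (Python) =====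
-- def prime_power(n):
--     primes = [2, 3, 5, 7, 11]
--     for i, p in enumerate(primes):
--         if n % p == 0:
--             power = prime_power(n // p)
--             power[i] += 1
--             return power
--     return [0] * 5
-- ===== Notes on version B (the rewrite author's own statement) =====
-- stated objective: simpler
-- what changed: Replaces the nested for-prime/while-divides loops and accumulator list with a single recursive function: find the first prime dividing n, recurse on the quotient, and increment that prime's slot in the returned vector on the way back.
import Mathlib
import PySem

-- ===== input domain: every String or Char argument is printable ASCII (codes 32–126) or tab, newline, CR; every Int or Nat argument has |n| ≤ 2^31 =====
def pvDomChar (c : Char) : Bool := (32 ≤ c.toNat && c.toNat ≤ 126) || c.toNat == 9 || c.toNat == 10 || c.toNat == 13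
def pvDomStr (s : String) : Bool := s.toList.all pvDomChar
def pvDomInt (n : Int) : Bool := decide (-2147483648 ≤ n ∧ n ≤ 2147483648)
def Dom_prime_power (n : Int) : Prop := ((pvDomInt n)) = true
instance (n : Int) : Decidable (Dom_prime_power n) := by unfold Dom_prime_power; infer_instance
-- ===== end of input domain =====

-- B replaces A's nested for-prime/while-divides loops with a single recursive function:
-- find the first listed prime dividing n, recurse on the quotient, increment that slot
-- on the way back (objective: simpler decomposition, same cost).


-- ===== PORT A =====
-- inner 'while n % prime == 0' loop of A; the fuel argument only makes it total
-- (n.natAbs fuel suffices for every n ≠ 0, which Pre_ guarantees; Python loops forever at n = 0)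
def pvInnerA (prime : Int) : Nat → Int → Int → Int × Int
  | 0, n, p => (p, n)
  | fuel + 1, n, p =>
    if PySem.Int.mod n prime = 0 then
      pvInnerA prime fuel (PySem.Int.floordiv n prime) (p + 1)
    else (p, n)

def prime_power (n : Int) : List Int :=
  let primes : List Int := [2, 3, 5, 7, 11]
  (primes.foldl (fun (st : List Int × Int) prime =>
      let r := pvInnerA prime (st.2.natAbs + 1) st.2 0
      (st.1 ++ [r.1], r.2)) ([], n)).1

-- ===== PORT B =====
-- 'for i, p in enumerate(primes): if n % p == 0: …' — the first dividing prime with its index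
def pvFirstDiv (n : Int) : List (Int × Int) → Option (Int × Int)
  | [] => none
  | (i, p) :: rest => if PySem.Int.mod n p = 0 then some (i, p) else pvFirstDiv n rest

-- Source B's recursion; the fuel argument only makes it total (n.natAbs suffices for every
-- n ≠ 0; at n = 0 the Python recurses forever). The enumerate index i is one of the
-- literals 0..4, so .toNat is exact here.
def pvRecB : Nat → Int → List Int
  | 0, _ => List.replicate 5 0
  | fuel + 1, n =>
    match pvFirstDiv n (PySem.List.enumerate [2, 3, 5, 7, 11]) with
    | some (i, p) =>
      let power := pvRecB fuel (PySem.Int.floordiv n p)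
      power.set i.toNat (power.getD i.toNat 0 + 1)
    | none => List.replicate 5 0

def prime_power_alt (n : Int) : List Int := pvRecB n.natAbs n

-- ===== PRECONDITION & SPEC =====
-- Pre_ excludes exactly n = 0, on which the Python A loops forever (and B recurses forever).
def Pre_prime_power (n : Int) : Prop := n ≠ 0
instance (n : Int) : Decidable (Pre_prime_power n) := by unfold Pre_prime_power; infer_instance
def pvWitness_prime_power : Int := (12)

def Spec_prime_power (n : Int) (out : List Int) : Prop := out = prime_power_alt n
instance (n : Int) (out : List Int) : Decidable (Spec_prime_power n out) := by unfold Spec_prime_power; infer_instance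

-- ===== CLAIM (what is proved, stated in full; the proofs are below) =====
def Claim_equal_prime_power : Prop := ∀ (n : Int), Dom_prime_power n → Pre_prime_power n → Spec_prime_power n (prime_power n)

-- ===== LEMMAS AND PROOFS =====

-- when 2 ≤ p divides n ≠ 0, floor-dividing by p strictly shrinks |n| and stays nonzero
-- (cited by the termination proof of pvMult below)
theorem pvShrink (p n : Int) (hp : 2 ≤ p) (hn : n ≠ 0) (hm : PySem.Int.mod n p = 0) :
    (PySem.Int.floordiv n p) ≠ 0 ∧ (PySem.Int.floordiv n p).natAbs < n.natAbs := by
  have hp0 : (0:Int) < p := by omega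
  have hd : p ∣ n := (PySem.Int.mod_eq_zero_iff_dvd n p).1 hm
  rw [PySem.Int.floordiv_eq_ediv_of_pos hp0]
  have hmul : n / p * p = n := Int.ediv_mul_cancel hd
  have h1 : n / p ≠ 0 := by
    intro h0; rw [h0, zero_mul] at hmul; exact hn hmul.symm
  refine ⟨h1, ?_⟩
  have hpn : (n / p).natAbs * p.natAbs = n.natAbs := by
    rw [← Int.natAbs_mul, hmul]
  nlinarith [Int.natAbs_pos.mpr h1, Int.natAbs_pos.mpr hn, (by omega : 2 ≤ p.natAbs)]

-- reference: (multiplicity of p in n, n with all p-factors removed)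
def pvMult (p n : Int) : Int × Int :=
  if h : 2 ≤ p ∧ n ≠ 0 ∧ PySem.Int.mod n p = 0 then
    let r := pvMult p (PySem.Int.floordiv n p)
    (r.1 + 1, r.2)
  else (0, n)
termination_by n.natAbs
decreasing_by exact (pvShrink p n h.1 h.2.1 h.2.2).2

-- per-prime reference fold over a prime list, threading the remaining n
def pvRef : List Int → Int → List Int
  | [], _ => []
  | p :: ps, n => (pvMult p n).1 :: pvRef ps (pvMult p n).2

theorem pvMult_pos (p n : Int) (h : 2 ≤ p ∧ n ≠ 0 ∧ PySem.Int.mod n p = 0) :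
    pvMult p n = ((pvMult p (PySem.Int.floordiv n p)).1 + 1, (pvMult p (PySem.Int.floordiv n p)).2) := by
  rw [pvMult, dif_pos h]

theorem pvMult_neg (p n : Int) (h : ¬ (2 ≤ p ∧ n ≠ 0 ∧ PySem.Int.mod n p = 0)) :
    pvMult p n = (0, n) := by
  rw [pvMult, dif_neg h]

theorem pvMult_snd_aux (p : Int) : ∀ (m : Nat) (n : Int), n.natAbs ≤ m → n ≠ 0 → (pvMult p n).2 ≠ 0 := by
  intro m
  induction m with
  | zero => intro n h hn; exfalso; have := Int.natAbs_pos.mpr hn; omega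
  | succ m ih =>
    intro n h hn
    by_cases hc : 2 ≤ p ∧ n ≠ 0 ∧ PySem.Int.mod n p = 0
    · have hs := pvShrink p n hc.1 hc.2.1 hc.2.2
      rw [pvMult_pos p n hc]
      exact ih _ (by omega) hs.1
    · rw [pvMult_neg p n hc]; exact hn

theorem pvMult_snd_ne_zero (p n : Int) (hn : n ≠ 0) : (pvMult p n).2 ≠ 0 :=
  pvMult_snd_aux p n.natAbs n le_rfl hn

theorem pvInnerA_eq (p : Int) (hp : 2 ≤ p) :
    ∀ (f : Nat) (n k : Int), n ≠ 0 → n.natAbs ≤ f →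
      pvInnerA p f n k = (k + (pvMult p n).1, (pvMult p n).2) := by
  intro f
  induction f with
  | zero => intro n k hn hf; exfalso; have := Int.natAbs_pos.mpr hn; omega
  | succ f ih =>
    intro n k hn hf
    by_cases hm : PySem.Int.mod n p = 0
    · have hs := pvShrink p n hp hn hm
      rw [pvInnerA, if_pos hm, ih _ _ hs.1 (by omega), pvMult_pos p n ⟨hp, hn, hm⟩]
      simp only [Prod.mk.injEq]
      exact ⟨by ring, trivial⟩
    · rw [pvInnerA, if_neg hm, pvMult_neg p n (by tauto)]
      simp

-- A's foldl accumulates exactly the reference fold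
theorem pvFoldA :
    ∀ (ps : List Int) (acc : List Int) (n : Int), n ≠ 0 → (∀ p ∈ ps, 2 ≤ p) →
      (ps.foldl (fun (st : List Int × Int) prime =>
          let r := pvInnerA prime (st.2.natAbs + 1) st.2 0
          (st.1 ++ [r.1], r.2)) (acc, n)).1 = acc ++ pvRef ps n := by
  intro ps
  induction ps with
  | nil => intro acc n _ _; simp [pvRef]
  | cons p ps ih =>
    intro acc n hn hps
    have hp : 2 ≤ p := hps p (by simp)
    simp only [List.foldl_cons]
    rw [pvInnerA_eq p hp _ n 0 hn (by omega)]
    rw [ih _ _ (pvMult_snd_ne_zero p n hn) (fun q hq => hps q (by simp [hq]))]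
    simp [pvRef]

-- a non-divisor of n stays a non-divisor after exact division by p
theorem pvModDivNe (q p n : Int) (hp : 0 < p) (hq : PySem.Int.mod n q ≠ 0)
    (hpn : PySem.Int.mod n p = 0) : PySem.Int.mod (PySem.Int.floordiv n p) q ≠ 0 := by
  have hd : p ∣ n := (PySem.Int.mod_eq_zero_iff_dvd n p).1 hpn
  rw [PySem.Int.floordiv_eq_ediv_of_pos hp, Ne, PySem.Int.mod_eq_zero_iff_dvd]
  intro h
  exact hq ((PySem.Int.mod_eq_zero_iff_dvd n q).2 (h.trans ⟨p, (Int.ediv_mul_cancel hd).symm⟩))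

-- B's recursion computes the reference fold over [2, 3, 5, 7, 11]
theorem pvRecB_eq :
    ∀ (f : Nat) (n : Int), n ≠ 0 → n.natAbs ≤ f → pvRecB f n = pvRef [2, 3, 5, 7, 11] n := by
  intro f
  induction f with
  | zero => intro n hn hf; exfalso; have := Int.natAbs_pos.mpr hn; omega
  | succ f ih =>
    intro n hn hf
    rw [pvRecB]
    by_cases h2 : PySem.Int.mod n 2 = 0
    · have hs := pvShrink 2 n (by norm_num) hn h2
      have e2 : pvMult 2 n = ((pvMult 2 (PySem.Int.floordiv n 2)).1 + 1, (pvMult 2 (PySem.Int.floordiv n 2)).2) :=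
        pvMult_pos 2 n ⟨by norm_num, hn, h2⟩
      simp only [PySem.List.enumerate_cons, PySem.List.enumerate_nil, pvFirstDiv, h2, reduceIte]
      rw [ih _ hs.1 (by omega)]
      simp only [pvRef, e2]
      simp [List.getD]
    · by_cases h3 : PySem.Int.mod n 3 = 0
      · have hs := pvShrink 3 n (by norm_num) hn h3
        have h2d := pvModDivNe 2 3 n (by norm_num) h2 h3
        have e2 : pvMult 2 n = (0, n) := pvMult_neg 2 n (by tauto)
        have e2' : pvMult 2 (PySem.Int.floordiv n 3) = (0, PySem.Int.floordiv n 3) :=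
          pvMult_neg 2 _ (fun h => h2d h.2.2)
        have e3 : pvMult 3 n = ((pvMult 3 (PySem.Int.floordiv n 3)).1 + 1, (pvMult 3 (PySem.Int.floordiv n 3)).2) :=
          pvMult_pos 3 n ⟨by norm_num, hn, h3⟩
        simp only [PySem.List.enumerate_cons, PySem.List.enumerate_nil, pvFirstDiv, h2, h3, reduceIte]
        rw [ih _ hs.1 (by omega)]
        simp only [pvRef, e2, e2', e3]
        simp [List.getD]
      · by_cases h5 : PySem.Int.mod n 5 = 0
        · have hs := pvShrink 5 n (by norm_num) hn h5
          have h2d := pvModDivNe 2 5 n (by norm_num) h2 h5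
          have e2 : pvMult 2 n = (0, n) := pvMult_neg 2 n (by tauto)
          have e2' : pvMult 2 (PySem.Int.floordiv n 5) = (0, PySem.Int.floordiv n 5) :=
            pvMult_neg 2 _ (fun h => h2d h.2.2)
          have h3d := pvModDivNe 3 5 n (by norm_num) h3 h5
          have e3 : pvMult 3 n = (0, n) := pvMult_neg 3 n (by tauto)
          have e3' : pvMult 3 (PySem.Int.floordiv n 5) = (0, PySem.Int.floordiv n 5) :=
            pvMult_neg 3 _ (fun h => h3d h.2.2)
          have e5 : pvMult 5 n = ((pvMult 5 (PySem.Int.floordiv n 5)).1 + 1, (pvMult 5 (PySem.Int.floordiv n 5)).2) :=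
            pvMult_pos 5 n ⟨by norm_num, hn, h5⟩
          simp only [PySem.List.enumerate_cons, PySem.List.enumerate_nil, pvFirstDiv, h2, h3, h5, reduceIte]
          rw [ih _ hs.1 (by omega)]
          simp only [pvRef, e2, e2', e3, e3', e5]
          simp [List.getD]
        · by_cases h7 : PySem.Int.mod n 7 = 0
          · have hs := pvShrink 7 n (by norm_num) hn h7
            have h2d := pvModDivNe 2 7 n (by norm_num) h2 h7
            have e2 : pvMult 2 n = (0, n) := pvMult_neg 2 n (by tauto)
            have e2' : pvMult 2 (PySem.Int.floordiv n 7) = (0, PySem.Int.floordiv n 7) :=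
              pvMult_neg 2 _ (fun h => h2d h.2.2)
            have h3d := pvModDivNe 3 7 n (by norm_num) h3 h7
            have e3 : pvMult 3 n = (0, n) := pvMult_neg 3 n (by tauto)
            have e3' : pvMult 3 (PySem.Int.floordiv n 7) = (0, PySem.Int.floordiv n 7) :=
              pvMult_neg 3 _ (fun h => h3d h.2.2)
            have h5d := pvModDivNe 5 7 n (by norm_num) h5 h7
            have e5 : pvMult 5 n = (0, n) := pvMult_neg 5 n (by tauto)
            have e5' : pvMult 5 (PySem.Int.floordiv n 7) = (0, PySem.Int.floordiv n 7) :=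
              pvMult_neg 5 _ (fun h => h5d h.2.2)
            have e7 : pvMult 7 n = ((pvMult 7 (PySem.Int.floordiv n 7)).1 + 1, (pvMult 7 (PySem.Int.floordiv n 7)).2) :=
              pvMult_pos 7 n ⟨by norm_num, hn, h7⟩
            simp only [PySem.List.enumerate_cons, PySem.List.enumerate_nil, pvFirstDiv, h2, h3, h5, h7, reduceIte]
            rw [ih _ hs.1 (by omega)]
            simp only [pvRef, e2, e2', e3, e3', e5, e5', e7]
            simp [List.getD]
          · by_cases h11 : PySem.Int.mod n 11 = 0
            · have hs := pvShrink 11 n (by norm_num) hn h11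
              have h2d := pvModDivNe 2 11 n (by norm_num) h2 h11
              have e2 : pvMult 2 n = (0, n) := pvMult_neg 2 n (by tauto)
              have e2' : pvMult 2 (PySem.Int.floordiv n 11) = (0, PySem.Int.floordiv n 11) :=
                pvMult_neg 2 _ (fun h => h2d h.2.2)
              have h3d := pvModDivNe 3 11 n (by norm_num) h3 h11
              have e3 : pvMult 3 n = (0, n) := pvMult_neg 3 n (by tauto)
              have e3' : pvMult 3 (PySem.Int.floordiv n 11) = (0, PySem.Int.floordiv n 11) :=
                pvMult_neg 3 _ (fun h => h3d h.2.2)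
              have h5d := pvModDivNe 5 11 n (by norm_num) h5 h11
              have e5 : pvMult 5 n = (0, n) := pvMult_neg 5 n (by tauto)
              have e5' : pvMult 5 (PySem.Int.floordiv n 11) = (0, PySem.Int.floordiv n 11) :=
                pvMult_neg 5 _ (fun h => h5d h.2.2)
              have h7d := pvModDivNe 7 11 n (by norm_num) h7 h11
              have e7 : pvMult 7 n = (0, n) := pvMult_neg 7 n (by tauto)
              have e7' : pvMult 7 (PySem.Int.floordiv n 11) = (0, PySem.Int.floordiv n 11) :=
                pvMult_neg 7 _ (fun h => h7d h.2.2)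
              have e11 : pvMult 11 n = ((pvMult 11 (PySem.Int.floordiv n 11)).1 + 1, (pvMult 11 (PySem.Int.floordiv n 11)).2) :=
                pvMult_pos 11 n ⟨by norm_num, hn, h11⟩
              simp only [PySem.List.enumerate_cons, PySem.List.enumerate_nil, pvFirstDiv, h2, h3, h5, h7, h11, reduceIte]
              rw [ih _ hs.1 (by omega)]
              simp only [pvRef, e2, e2', e3, e3', e5, e5', e7, e7', e11]
              simp [List.getD]
            · simp only [PySem.List.enumerate_cons, PySem.List.enumerate_nil, pvFirstDiv,
                h2, h3, h5, h7, h11, reduceIte]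
              have e2 : pvMult 2 n = (0, n) := pvMult_neg 2 n (by tauto)
              have e3 : pvMult 3 n = (0, n) := pvMult_neg 3 n (by tauto)
              have e5 : pvMult 5 n = (0, n) := pvMult_neg 5 n (by tauto)
              have e7 : pvMult 7 n = (0, n) := pvMult_neg 7 n (by tauto)
              have e11 : pvMult 11 n = (0, n) := pvMult_neg 11 n (by tauto)
              simp [pvRef, e2, e3, e5, e7, e11, List.replicate]

-- ===== VERDICT (by name: the statement is the Claim_ definition above) =====
theorem prime_power_spec : Claim_equal_prime_power := by
  intro n _ hn
  unfold Spec_prime_power prime_power prime_power_alt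
  rw [pvFoldA [2, 3, 5, 7, 11] [] n hn (by intro p hp; fin_cases hp <;> omega)]
  rw [pvRecB_eq n.natAbs n hn le_rfl]
  simp
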